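-- pv_equiv track=rewrite | github.com/chielingyueh/GoEmotions | data_transformation.py | ekman_emotions
-- ===== SOURCE A (Python) =====
-- def ekman_emotions(emotion_list, ekman_mapping):
--     ekman = []
--     for emotion in emotion_list:
--         if emotion != 'neutral':
--             key = [k for k, v in ekman_mapping.items() if emotion in v]
--             if key[0] not in ekman:
--                 ekman.append(key[0])
--         else:
--             ekman.append('neutral')
--     return ekman
-- ===== SOURCE B (Python) =====
-- def ekman_emotions(emotion_list, ekman_mapping):
--     # inverted index: emotion -> first ekman key whose value list contains it
--     index = {}
--     for k, vs in ekman_mapping.items():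
--         for e in vs:
--             index.setdefault(e, k)
--     out = []
--     seen = set()
--     for emotion in emotion_list:
--         if emotion == 'neutral':
--             out.append('neutral')
--             seen.add('neutral')
--         else:
--             k = index[emotion]
--             if k not in seen:
--                 out.append(k)
--                 seen.add(k)
--     return out
-- ===== Notes on version B (the rewrite author's own statement) =====
-- stated objective: faster
-- what changed: Replace the per-emotion scan of the whole mapping by a precomputed inverted index emotion->first key plus a seen-set, turning O(E*M) into one pass over the mapping and one over the emotion list.
import Mathlib
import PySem

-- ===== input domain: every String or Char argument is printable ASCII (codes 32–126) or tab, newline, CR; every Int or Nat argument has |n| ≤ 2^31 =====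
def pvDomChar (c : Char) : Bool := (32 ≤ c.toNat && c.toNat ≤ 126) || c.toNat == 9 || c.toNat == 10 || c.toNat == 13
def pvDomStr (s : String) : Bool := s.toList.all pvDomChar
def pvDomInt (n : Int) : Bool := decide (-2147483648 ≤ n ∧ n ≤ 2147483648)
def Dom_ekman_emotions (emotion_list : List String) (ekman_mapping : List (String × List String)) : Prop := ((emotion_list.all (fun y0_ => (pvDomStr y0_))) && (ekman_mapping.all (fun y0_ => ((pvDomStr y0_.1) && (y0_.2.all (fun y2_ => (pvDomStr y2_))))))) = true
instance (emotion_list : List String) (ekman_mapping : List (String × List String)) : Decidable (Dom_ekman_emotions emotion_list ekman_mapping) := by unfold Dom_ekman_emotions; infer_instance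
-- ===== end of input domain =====

-- ===== PORT A =====
-- B precomputes an inverted index emotion->first key and a seen-set: O(E+M) instead of A's O(E*M) rescans.
def ekman_emotions (emotion_list : List String) (ekman_mapping : List (String × List String)) : List String :=
  emotion_list.foldl (fun ekman emotion =>
    if emotion ≠ "neutral" then
      let key := (ekman_mapping.filter (fun kv => kv.2.contains emotion)).map Prod.fst
      match key.head? with
      | some k0 => if ¬ (ekman.contains k0) then ekman ++ [k0] else ekman
      | none => ekman   -- Python raises IndexError here; excluded by Pre_
    else ekman ++ ["neutral"]) []

-- ===== PORT B =====
def pvBuildIndex (ekman_mapping : List (String × List String)) : PySem.Dict String String :=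
  ekman_mapping.foldl (fun idx kv => kv.2.foldl (fun idx e => idx.setdefault e kv.1) idx) PySem.Dict.empty

def ekman_emotions_alt (emotion_list : List String) (ekman_mapping : List (String × List String)) : List String :=
  let index := pvBuildIndex ekman_mapping
  (emotion_list.foldl (fun (acc : List String × PySem.Set String) emotion =>
      if emotion == "neutral" then (acc.1 ++ ["neutral"], PySem.Set.add acc.2 "neutral")
      else
        match index.get? emotion with
        | some k => if PySem.Set.contains acc.2 k then acc else (acc.1 ++ [k], PySem.Set.add acc.2 k)
        | none => acc   -- Python raises KeyError here; excluded by Pre_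
    ) ([], PySem.Set.empty)).1

-- ===== PRECONDITION & SPEC =====
-- Pre_ excludes exactly the inputs where A raises IndexError (and B KeyError): some non-neutral
-- emotion occurring in emotion_list is absent from every value list of ekman_mapping.
def Pre_ekman_emotions (emotion_list : List String) (ekman_mapping : List (String × List String)) : Prop :=
  ∀ e ∈ emotion_list, e ≠ "neutral" → ∃ kv ∈ ekman_mapping, e ∈ kv.2
instance (emotion_list : List String) (ekman_mapping : List (String × List String)) : Decidable (Pre_ekman_emotions emotion_list ekman_mapping) := by unfold Pre_ekman_emotions; infer_instance
def pvWitness_ekman_emotions : List String × (List (String × List String)) :=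
  (["joy", "anger", "neutral", "joy"], [("happy", ["joy", "amusement"]), ("mad", ["anger"])])
def Spec_ekman_emotions (emotion_list : List String) (ekman_mapping : List (String × List String)) (out : List String) : Prop := out = ekman_emotions_alt emotion_list ekman_mapping
instance (emotion_list : List String) (ekman_mapping : List (String × List String)) (out : List String) : Decidable (Spec_ekman_emotions emotion_list ekman_mapping out) := by unfold Spec_ekman_emotions; infer_instance

-- ===== CLAIM (what is proved, stated in full; the proofs are below) =====
def Claim_equal_ekman_emotions : Prop := ∀ (emotion_list : List String) (ekman_mapping : List (String × List String)), Dom_ekman_emotions emotion_list ekman_mapping → Pre_ekman_emotions emotion_list ekman_mapping → Spec_ekman_emotions emotion_list ekman_mapping (ekman_emotions emotion_list ekman_mapping)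

-- ===== LEMMAS AND PROOFS =====

-- setdefault-loop over one value list: first binding wins
theorem pv_setdefault_fold_get (vs : List String) (k : String) (d : PySem.Dict String String) (e : String) :
    (vs.foldl (fun idx x => idx.setdefault x k) d).get? e
    = (d.get? e).or (if e ∈ vs then some k else none) := by
  induction vs generalizing d with
  | nil => simp
  | cons x xs ih =>
    simp only [List.foldl_cons]
    rw [ih]
    by_cases hc : d.contains x = true
    · rw [PySem.Dict.setdefault_of_contains d k hc]
      by_cases hex : e = x
      · subst hex
        have hs : (d.get? e).isSome := by rw [← PySem.Dict.contains_eq_isSome_get?]; exact hc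
        obtain ⟨v, hv⟩ := Option.isSome_iff_exists.mp hs
        simp [hv]
      · simp [List.mem_cons, hex]
    · rw [PySem.Dict.setdefault_of_not_contains d k (by simpa using hc)]
      by_cases hex : e = x
      · subst hex
        have h0 : d.get? e = none := by
          rw [← Option.not_isSome_iff_eq_none, ← PySem.Dict.contains_eq_isSome_get?]
          simpa using hc
        simp [h0]
      · rw [PySem.Dict.get?_insert_of_ne d k hex]
        simp [List.mem_cons, hex]

-- the inverted index holds, for each emotion, the first key whose value list contains it
theorem pv_buildIndex_get (em : List (String × List String)) (d : PySem.Dict String String) (e : String) :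
    (em.foldl (fun idx kv => kv.2.foldl (fun idx x => idx.setdefault x kv.1) idx) d).get? e
    = (d.get? e).or (((em.filter (fun kv => kv.2.contains e)).map Prod.fst).head?) := by
  induction em generalizing d with
  | nil => simp
  | cons kv rest ih =>
    simp only [List.foldl_cons]
    rw [ih, pv_setdefault_fold_get]
    by_cases h : kv.2.contains e
    · have he : e ∈ kv.2 := by simpa using h
      simp [he]
    · have he : ¬ e ∈ kv.2 := by simpa using h
      simp [he]

-- main loop invariant: A's accumulator equals B's output component, B's seen-set has the same members
theorem pv_loop (em : List (String × List String)) (el : List String)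
    (ekman seen : List String)
    (hseen : ∀ x : String, x ∈ seen ↔ x ∈ ekman)
    (hpre : ∀ e ∈ el, e ≠ "neutral" → ∃ kv ∈ em, e ∈ kv.2) :
    el.foldl (fun ekman emotion =>
      if emotion ≠ "neutral" then
        match ((em.filter (fun kv => kv.2.contains emotion)).map Prod.fst).head? with
        | some k0 => if ¬ (ekman.contains k0) then ekman ++ [k0] else ekman
        | none => ekman
      else ekman ++ ["neutral"]) ekman
    = (el.foldl (fun (acc : List String × PySem.Set String) emotion =>
        if emotion == "neutral" then (acc.1 ++ ["neutral"], PySem.Set.add acc.2 "neutral")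
        else
          match (pvBuildIndex em).get? emotion with
          | some k => if PySem.Set.contains acc.2 k then acc else (acc.1 ++ [k], PySem.Set.add acc.2 k)
          | none => acc) (ekman, seen)).1 := by
  induction el generalizing ekman seen with
  | nil => simp
  | cons e rest ih =>
    simp only [List.foldl_cons]
    by_cases hne : e = "neutral"
    · subst hne
      simp only [ne_eq, not_true_eq_false, if_false, BEq.rfl, reduceIte]
      exact ih (ekman ++ ["neutral"]) (PySem.Set.add seen "neutral")
        (by intro x; simp [PySem.Set.mem_add, hseen x, List.mem_append, or_comm])
        (fun e' h' => hpre e' (List.mem_cons_of_mem _ h'))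
    · obtain ⟨kv, hkv, he⟩ := hpre e (List.mem_cons_self) hne
      have hfil : kv ∈ em.filter (fun kv => kv.2.contains e) :=
        List.mem_filter.mpr ⟨hkv, by simpa using he⟩
      obtain ⟨k0, hk0⟩ : ∃ k0, ((em.filter (fun kv => kv.2.contains e)).map Prod.fst).head? = some k0 := by
        cases hL : (em.filter (fun kv => kv.2.contains e)).map Prod.fst with
        | nil =>
          exfalso
          have hm : kv.1 ∈ (em.filter (fun kv => kv.2.contains e)).map Prod.fst :=
            List.mem_map.mpr ⟨kv, hfil, rfl⟩
          rw [hL] at hm; simp at hm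
        | cons a t => exact ⟨a, rfl⟩
      have hidx : (pvBuildIndex em).get? e = some k0 := by
        rw [pvBuildIndex, pv_buildIndex_get, PySem.Dict.get?_empty, Option.none_or, hk0]
      have hbeq : (e == "neutral") = false := by simpa using hne
      have hcont : PySem.Set.contains seen k0 = ekman.contains k0 := by
        have := hseen k0
        by_cases hmem : k0 ∈ ekman
        · simp [PySem.Set.contains, hmem, this.mpr hmem]
        · have h2 : k0 ∉ seen := fun h => hmem (this.mp h)
          simp [PySem.Set.contains, hmem, h2]
      rw [if_pos hne, hk0, hbeq]
      simp only [Bool.false_eq_true, if_false, hidx]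
      by_cases hmem : k0 ∈ ekman
      · have hA : ekman.contains k0 = true := by simpa using hmem
        rw [hcont, hA]
        simp only [not_true, reduceIte]
        exact ih ekman seen hseen (fun e' h' => hpre e' (List.mem_cons_of_mem _ h'))
      · have hA : ekman.contains k0 = false := by simpa using hmem
        rw [hcont, hA]
        simp only [Bool.false_eq_true, if_false, not_false_iff, reduceIte]
        exact ih (ekman ++ [k0]) (PySem.Set.add seen k0)
          (by intro x; simp [PySem.Set.mem_add, hseen x, List.mem_append, or_comm])
          (fun e' h' => hpre e' (List.mem_cons_of_mem _ h'))

-- ===== VERDICT (by name: the statement is the Claim_ definition above) =====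
theorem ekman_emotions_spec : Claim_equal_ekman_emotions := by
  intro el em _ hpre
  unfold Spec_ekman_emotions ekman_emotions ekman_emotions_alt
  exact pv_loop em el [] [] (by simp) hpre
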